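-- pv_equiv track=rewrite | github.com/konstantinosKokos/metaclass-cfg | src/examples/control_spans/span_realization.py | span_surface_to_data
-- ===== SOURCE A (Python) =====
-- from itertools import product
--
-- Matching = dict[int, int]
--
-- SpanSurface = tuple[list[list[int]], list[list[int]], list[list[str]]]
--
-- def get_span(idx: int, surf: str) -> list[int]:
--     return len(surf.split()) * [idx]
--
-- def get_span_ids(spans: list[list[int]]):
--     return set([n for s in spans for n in s])
--
-- def span_surface_example_to_data(spans: list[list[int]], span_idx: int, surface: tuple[str]):
--     all_spans = []
--     for span, surf in zip(spans, surface):
--         cur_idx = span_idx if span_idx in span else None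
--         cur_span = get_span(cur_idx, surf)
--         all_spans.append(cur_span)
--     return [n for s in all_spans for n in s]
--
-- def span_surface_to_data(span_surf: SpanSurface, matchings: Matching, verb_idx: int):
--     np_spans, vp_spans, surfs = span_surf
--     surf_options = list(product(*surfs))
--     all_results = []
--     for surf_opt in surf_options:
--         result = [span_surface_example_to_data(np_spans, i, surf_opt) for i in get_span_ids(np_spans)], ' '.join(surf_opt)
--         all_results.append(result)
--     return all_results
-- ===== SOURCE B (Python) =====
-- def span_surface_to_data(span_surf, matchings, verb_idx):
--     np_spans, vp_spans, surfs = span_surf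
--     ids = list({n for s in np_spans for n in s})
--
--     def expand(k):
--         if k == len(surfs):
--             return [([], [])]
--         tails = expand(k + 1)
--         step = []
--         for w in surfs[k]:
--             seg = len(w.split()) * [k] if k < len(np_spans) else []
--             for lay, words in tails:
--                 step.append((seg + lay, [w] + words))
--         return step
--
--     return [([[i if i in np_spans[j] else None for j in lay] for i in ids],
--              ' '.join(words)) for lay, words in expand(0)]
-- ===== Notes on version B (the rewrite author's own statement) =====
-- stated objective: alternative
-- what changed: A runs itertools.product and then, for every surface option and every span id, re-splits each surface string to build that id's row; B builds each option's token layout and word list together in one recursion over the surface lists (no itertools.product), computes the set of span ids once instead of once per option, and fills every id row by a membership test mapped over the layout.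
import Mathlib
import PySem

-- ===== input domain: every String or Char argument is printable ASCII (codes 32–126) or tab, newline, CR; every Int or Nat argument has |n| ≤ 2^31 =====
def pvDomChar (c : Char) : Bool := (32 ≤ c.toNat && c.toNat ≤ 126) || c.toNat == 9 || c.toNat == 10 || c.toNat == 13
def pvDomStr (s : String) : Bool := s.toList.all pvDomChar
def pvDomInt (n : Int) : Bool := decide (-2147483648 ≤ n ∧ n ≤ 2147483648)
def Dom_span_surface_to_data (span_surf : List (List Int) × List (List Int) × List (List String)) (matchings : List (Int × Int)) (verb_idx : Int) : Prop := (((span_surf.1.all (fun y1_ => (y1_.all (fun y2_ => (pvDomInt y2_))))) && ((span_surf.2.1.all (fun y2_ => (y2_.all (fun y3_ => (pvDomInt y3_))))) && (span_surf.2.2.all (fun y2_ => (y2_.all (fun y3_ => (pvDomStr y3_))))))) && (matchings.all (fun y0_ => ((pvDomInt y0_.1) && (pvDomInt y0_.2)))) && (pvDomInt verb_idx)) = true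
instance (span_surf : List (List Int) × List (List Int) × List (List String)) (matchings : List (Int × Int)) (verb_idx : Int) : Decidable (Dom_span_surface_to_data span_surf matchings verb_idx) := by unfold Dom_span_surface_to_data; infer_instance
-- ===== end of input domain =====

-- B replaces A's "itertools.product, then one full re-split pass per span id" with a single
-- recursion over the surface lists that builds each option's token layout and word list together,
-- the id rows then read off that layout; set order of ids computed once (objective: alternative).

-- Shared library helper: CPython 3.11's int set, exactly (hash(x)=x except hash(-1)=-2, open
-- addressing with 9 linear probes, perturb>>=5 before the jump, resize at fill*5 >= mask*3 to
-- >4*used), iterated in slot order; exact for |x| ≤ 2^31, checked empirically against CPython.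
-- Both Pythons build the same set from the same flattened list, so one model serves both ports.
def pvHash (x : Int) : Nat := (((if x = -1 then -2 else x)) % (2^64 : Int)).toNat

-- the probe sequence of slot indices CPython visits for a given hash (fuel-bounded)
def pvProbes (mask : Nat) : Nat → Nat → Nat → List Nat
  | _, _, 0 => []
  | i, p, fuel+1 =>
    (i :: (if i + 9 ≤ mask then (List.range 9).map (fun t => i + t + 1) else []))
      ++ pvProbes mask ((i*5 + 1 + p/32) % (mask+1)) (p/32) fuel

-- first probed slot that is empty or already holds x
def pvFindSlot (t : Array (Option Int)) (x : Int) (h : Nat) : Option Nat :=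
  (pvProbes (t.size - 1) (h % t.size) h (2*t.size + 70)).find? (fun j =>
    match t.getD j none with | none => true | some y => y == x)

def pvNewSizeGo (minused : Nat) : Nat → Nat → Nat
  | s, 0 => s
  | s, f+1 => if s ≤ minused then pvNewSizeGo minused (s*2) f else s

def pvNewSize (minused : Nat) : Nat := pvNewSizeGo minused 8 64

-- insert during resize: the table has no duplicates, so "empty or equal" finds the empty slot
def pvCleanIns (t : Array (Option Int)) (x : Int) : Array (Option Int) :=
  match pvFindSlot t x (pvHash x) with
  | some j => t.set! j (some x)
  | none => t

def pvSetAdd (st : Array (Option Int) × Nat) (x : Int) : Array (Option Int) × Nat :=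
  let t := st.1
  match pvFindSlot t x (pvHash x) with
  | none => st
  | some j =>
    match t.getD j none with
    | some _ => st
    | none =>
      let t := t.set! j (some x)
      let fill := st.2 + 1
      if fill * 5 ≥ (t.size - 1) * 3 then
        let minused := if fill > 50000 then fill*2 else fill*4
        ((t.toList.filterMap id).foldl pvCleanIns (Array.replicate (pvNewSize minused) none), fill)
      else (t, fill)

-- list(set(xs)) for ints
def pySetList (xs : List Int) : List Int :=
  ((xs.foldl pvSetAdd (Array.replicate 8 none, 0)).1.toList).filterMap id

-- ===== PORT A =====
-- itertools.product(*surfs) (rightmost varies fastest)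
def pvProduct (ls : List (List String)) : List (List String) :=
  ls.foldr (fun l acc => l.flatMap (fun x => acc.map (fun r => x :: r))) [[]]

-- get_span_ids(spans) = set([n for s in spans for n in s])
def pvGetSpanIds (spans : List (List Int)) : List Int :=
  pySetList (spans.flatMap (fun s => s))

-- get_span(idx, surf) = len(surf.split()) * [idx]
def pvGetSpan (idx : Option Int) (surf : String) : List (Option Int) :=
  PySem.List.pyRepeat [idx] ((PySem.Str.split₀ surf).length : Int)

-- span_surface_example_to_data
def pvExampleToData (spans : List (List Int)) (span_idx : Int) (surface : List String) : List (Option Int) :=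
  let all_spans := (spans.zip surface).foldl (fun acc p =>
    acc ++ [pvGetSpan (if span_idx ∈ p.1 then some span_idx else none) p.2]) []
  all_spans.flatMap (fun s => s)

def span_surface_to_data (span_surf : List (List Int) × List (List Int) × List (List String)) (matchings : List (Int × Int)) (verb_idx : Int) : List (List (List (Option Int)) × String) :=
  let np_spans := span_surf.1
  let surfs := span_surf.2.2
  let surf_options := pvProduct surfs
  surf_options.foldl (fun all_results surf_opt =>
    all_results ++ [((pvGetSpanIds np_spans).map (fun i => pvExampleToData np_spans i surf_opt),
                    PySem.Str.join " " surf_opt)]) []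

-- ===== PORT B =====
-- expand(k) of Source B: all (layout, word list) pairs for surfs[k:], built in one recursion
def bExpand (np_spans : List (List Int)) : Nat → List (List String) → List (List Int × List String)
  | _, [] => [([], [])]
  | k, ws :: rest =>
    let tails := bExpand np_spans (k+1) rest
    ws.flatMap (fun w =>
      let seg : List Int :=
        if k < np_spans.length then List.replicate (PySem.Str.split₀ w).length (k : Int) else []
      tails.map (fun t => (seg ++ t.1, w :: t.2)))

def span_surface_to_data_alt (span_surf : List (List Int) × List (List Int) × List (List String)) (matchings : List (Int × Int)) (verb_idx : Int) : List (List (List (Option Int)) × String) :=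
  let np_spans := span_surf.1
  let ids := pySetList (np_spans.flatMap (fun s => s))
  (bExpand np_spans 0 span_surf.2.2).map (fun lw =>
    (ids.map (fun i => lw.1.map (fun j =>
        if i ∈ PySem.List.pyGetD np_spans j [] then some i else none)),
     PySem.Str.join " " lw.2))

-- ===== PRECONDITION & SPEC =====
def Spec_span_surface_to_data (span_surf : List (List Int) × List (List Int) × List (List String)) (matchings : List (Int × Int)) (verb_idx : Int) (out : List (List (List (Option Int)) × String)) : Prop := out = span_surface_to_data_alt span_surf matchings verb_idx
instance (span_surf : List (List Int) × List (List Int) × List (List String)) (matchings : List (Int × Int)) (verb_idx : Int) (out : List (List (List (Option Int)) × String)) : Decidable (Spec_span_surface_to_data span_surf matchings verb_idx out) := by unfold Spec_span_surface_to_data; infer_instance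

-- ===== CLAIM (what is proved, stated in full; the proofs are below) =====
def Claim_equal_span_surface_to_data : Prop := ∀ (span_surf : List (List Int) × List (List Int) × List (List String)) (matchings : List (Int × Int)) (verb_idx : Int), Dom_span_surface_to_data span_surf matchings verb_idx → Spec_span_surface_to_data span_surf matchings verb_idx (span_surface_to_data span_surf matchings verb_idx)

-- ===== LEMMAS AND PROOFS =====

-- the layout B's recursion attaches to an option, as a standalone function of the option
def pvLay (np : List (List Int)) : Nat → List String → List Int
  | _, [] => []
  | k, w :: rest =>
    (if k < np.length then List.replicate (PySem.Str.split₀ w).length (k : Int) else [])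
      ++ pvLay np (k+1) rest

theorem pvLay_of_le (np : List (List Int)) (opt : List String) (k : Nat) (h : np.length ≤ k) :
    pvLay np k opt = [] := by
  induction opt generalizing k with
  | nil => rfl
  | cons w rest ih =>
      simp [pvLay, Nat.not_lt.mpr h, ih (k+1) (by omega)]

-- B's recursion = A's product, each option paired with its layout
theorem bExpand_eq (np : List (List Int)) (surfs : List (List String)) (k : Nat) :
    bExpand np k surfs = (pvProduct surfs).map (fun opt => (pvLay np k opt, opt)) := by
  induction surfs generalizing k with
  | nil => rfl
  | cons ws rest ih =>
      simp only [bExpand, ih (k+1), pvProduct, List.foldr_cons]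
      have : pvProduct rest = rest.foldr (fun l acc => l.flatMap (fun x => acc.map (fun r => x :: r))) [[]] := rfl
      rw [← this]
      simp [List.map_flatMap, List.map_map, Function.comp_def, pvLay]

-- A's per-id row equals the layout row, generalized over the start index
theorem row_eq (np : List (List Int)) (i : Int) (opt : List String) (k : Nat) :
    ((np.drop k).zip opt).flatMap
        (fun p => pvGetSpan (if i ∈ p.1 then some i else none) p.2) =
      (pvLay np k opt).map
        (fun j => if i ∈ PySem.List.pyGetD np j [] then some i else none) := by
  induction opt generalizing k with
  | nil => simp [pvLay]
  | cons w rest ih =>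
      by_cases hk : k < np.length
      · rw [List.drop_eq_getElem_cons hk]
        simp only [List.zip_cons_cons, List.flatMap_cons, pvLay, if_pos hk]
        rw [List.map_append, ← ih (k+1)]
        congr 1
        simp only [pvGetSpan, PySem.List.pyRepeat_singleton, List.map_replicate]
        have hg : PySem.List.pyGetD np ((k : Nat) : Int) [] = np[k] := by
          rw [PySem.List.pyGetD_natCast]
          exact List.getD_eq_getElem _ _ hk
        rw [hg]
        simp
      · rw [List.drop_of_length_le (by omega), pvLay_of_le np _ k (by omega)]
        simp

-- A's span_surface_example_to_data is the layout row (at start index 0)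
theorem example_eq (np : List (List Int)) (i : Int) (opt : List String) :
    pvExampleToData np i opt =
      (pvLay np 0 opt).map
        (fun j => if i ∈ PySem.List.pyGetD np j [] then some i else none) := by
  unfold pvExampleToData
  rw [PySem.List.foldl_append_singleton_eq_map]
  simp only [List.nil_append, List.flatMap_map]
  have := row_eq np i opt 0
  simpa using this

-- ===== VERDICT (by name: the statement is the Claim_ definition above) =====
theorem span_surface_to_data_spec : Claim_equal_span_surface_to_data := by
  intro ss m v _
  unfold Spec_span_surface_to_data span_surface_to_data span_surface_to_data_alt
  dsimp only
  rw [PySem.List.foldl_append_singleton_eq_map, bExpand_eq ss.1 ss.2.2 0]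
  simp only [List.nil_append, List.map_map, Function.comp_def]
  apply List.map_congr_left
  intro opt _
  refine Prod.ext ?_ rfl
  simp only [pvGetSpanIds]
  apply List.map_congr_left
  intro i _
  exact example_eq ss.1 i opt
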